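-- pv_equiv track=rewrite | github.com/MartinThoma/hwrt | hwrt/segmentation/segmentation.py | has_wrong_break
-- ===== SOURCE A (Python) =====
-- def has_wrong_break(real_seg, pred_seg):
--     """
--     Parameters
--     ----------
--     real_seg : list of integers
--         The segmentation as it should be.
--     pred_seg : list of integers
--         The predicted segmentation.
--
--     Returns
--     -------
--     bool :
--         True, if strokes of one symbol were segmented to be in different
--         symbols.
--     """
--     for symbol_real in real_seg:
--         for symbol_pred in pred_seg:
--             if symbol_real[0] in symbol_pred:
--                 for stroke in symbol_real:
--                     if stroke not in symbol_pred:
--                         return True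
--     return False
-- ===== SOURCE B (Python) =====
-- def has_wrong_break(real_seg, pred_seg):
--     # Index each distinct stroke to the (frozen) predicted symbols containing
--     # it, then check each real symbol (as a frozenset) only against the
--     # predicted symbols indexed under its first stroke, with set lookups.
--     idx = {}
--     for p in pred_seg:
--         pset = frozenset(p)
--         for stroke in dict.fromkeys(p):
--             idx.setdefault(stroke, []).append(pset)
--     for r in real_seg:
--         rset = frozenset(r)
--         for pset in idx.get(r[0], []):
--             if not pset.issuperset(rset):
--                 return True
--     return False
-- ===== Notes on version B (the rewrite author's own statement) =====
-- stated objective: alternative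
-- what changed: B precomputes a stroke-to-containing-predicted-symbols (frozenset) index in one pass and checks each real symbol (as a frozenset) only against the predicted symbols indexed under its first stroke, instead of A's scan of every predicted symbol with list membership tests per real symbol; A's early exit can still beat B's up-front index build on inputs with an early wrong break.
-- outside the precondition, e.g. on has_wrong_break([[1, 3], []], [[1, 2]]): A returns True, B returns True; on has_wrong_break([[]], []): A returns False, B raises IndexError; on has_wrong_break([[1], []], [[1]]): A raises IndexError, B raises IndexError
import Mathlib
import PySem

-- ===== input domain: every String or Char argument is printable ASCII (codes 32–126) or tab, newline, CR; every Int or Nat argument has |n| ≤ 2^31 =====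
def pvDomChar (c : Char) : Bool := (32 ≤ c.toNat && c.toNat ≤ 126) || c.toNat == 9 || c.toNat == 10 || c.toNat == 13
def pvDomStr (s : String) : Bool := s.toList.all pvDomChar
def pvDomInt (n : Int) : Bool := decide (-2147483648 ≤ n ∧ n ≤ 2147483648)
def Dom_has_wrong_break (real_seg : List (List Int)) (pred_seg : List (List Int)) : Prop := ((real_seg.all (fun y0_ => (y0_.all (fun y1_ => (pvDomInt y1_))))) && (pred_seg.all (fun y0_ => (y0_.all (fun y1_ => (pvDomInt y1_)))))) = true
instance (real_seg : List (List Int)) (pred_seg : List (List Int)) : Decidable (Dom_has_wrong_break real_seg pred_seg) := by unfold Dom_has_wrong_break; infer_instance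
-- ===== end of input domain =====

-- B replaces A's rescan of all predicted symbols per real symbol by a stroke→containing-symbols index built once, with set lookups (objective: alternative).

-- ===== PORT A =====
def has_wrong_break (real_seg : List (List Int)) (pred_seg : List (List Int)) : Bool :=
  real_seg.any (fun symbol_real =>
    pred_seg.any (fun symbol_pred =>
      match PySem.List.pyGet? symbol_real 0 with
      | none => false   -- Python raises IndexError here; excluded by Pre_
      | some h => decide (h ∈ symbol_pred) && symbol_real.any (fun stroke => decide (stroke ∉ symbol_pred))))

-- ===== PORT B =====
def has_wrong_break_alt (real_seg : List (List Int)) (pred_seg : List (List Int)) : Bool :=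
  let idx : PySem.Dict Int (List (PySem.Set Int)) :=
    pred_seg.foldl (fun d p =>
      let pset := PySem.Set.ofList p
      (PySem.List.dedup p).foldl (fun d stroke => d.modify stroke [] (· ++ [pset])) d)  -- for stroke in dict.fromkeys(p): setdefault(..., []).append(pset)
      PySem.Dict.empty
  real_seg.any (fun r =>
    let rset := PySem.Set.ofList r
    match PySem.List.pyGet? r 0 with
    | none => false   -- Python raises IndexError here; excluded by Pre_
    | some h => (idx.getD h []).any (fun pset => !(PySem.Set.issuperset pset rset)))

-- ===== PRECONDITION & SPEC =====
-- Pre_ excludes real_seg containing an empty symbol list: there both programs raise IndexError on r[0],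
-- except that each may return a value first by an accident of its loop order (A when pred_seg is empty
-- or a wrong break is detected earlier; B likewise) — an artefact neither behaviour specifies.
def Pre_has_wrong_break (real_seg : List (List Int)) (pred_seg : List (List Int)) : Prop :=
  ∀ r ∈ real_seg, r ≠ []
instance (real_seg : List (List Int)) (pred_seg : List (List Int)) : Decidable (Pre_has_wrong_break real_seg pred_seg) := by unfold Pre_has_wrong_break; infer_instance
def pvWitness_has_wrong_break : List (List Int) × List (List Int) := ([[1, 2], [3]], [[1, 3], [2]])

def Spec_has_wrong_break (real_seg : List (List Int)) (pred_seg : List (List Int)) (out : Bool) : Prop := out = has_wrong_break_alt real_seg pred_seg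
instance (real_seg : List (List Int)) (pred_seg : List (List Int)) (out : Bool) : Decidable (Spec_has_wrong_break real_seg pred_seg out) := by unfold Spec_has_wrong_break; infer_instance

-- ===== CLAIM (what is proved, stated in full; the proofs are below) =====
def Claim_equal_has_wrong_break : Prop := ∀ (real_seg : List (List Int)) (pred_seg : List (List Int)), Dom_has_wrong_break real_seg pred_seg → Pre_has_wrong_break real_seg pred_seg → Spec_has_wrong_break real_seg pred_seg (has_wrong_break real_seg pred_seg)

-- ===== LEMMAS AND PROOFS =====

-- the inner index-building loop over one predicted symbol, characterised
theorem pv_getD_inner (p : List Int) (q : PySem.Set Int) (d : PySem.Dict Int (List (PySem.Set Int))) (h : Int) :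
    (p.foldl (fun d stroke => d.modify stroke [] (· ++ [q])) d).getD h []
      = d.getD h [] ++ List.replicate (p.count h) q := by
  induction p generalizing d with
  | nil => simp
  | cons s p ih =>
      simp only [List.foldl_cons, ih, PySem.Dict.getD_modify, List.count_cons]
      by_cases hs : h = s
      · subst hs
        simp [List.append_assoc, List.replicate_succ]
      · simp [hs, Ne.symm hs]

-- the whole index, characterised
theorem pv_getD_idx (ps : List (List Int)) (d : PySem.Dict Int (List (PySem.Set Int))) (h : Int) :
    (ps.foldl (fun d p => (PySem.List.dedup p).foldl (fun d stroke => d.modify stroke [] (· ++ [PySem.Set.ofList p])) d) d).getD h []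
      = d.getD h [] ++ ps.flatMap (fun p => List.replicate ((PySem.List.dedup p).count h) (PySem.Set.ofList p)) := by
  induction ps generalizing d with
  | nil => simp
  | cons p ps ih =>
      rw [List.foldl_cons, ih, pv_getD_inner]
      simp [List.append_assoc]

theorem pv_any_replicate {α : Type} (n : Nat) (q : α) (P : α → Bool) :
    (List.replicate n q).any P = (decide (n ≠ 0) && P q) := by
  cases n with
  | zero => simp
  | succ n => simp [List.any_replicate]

theorem pv_any_congr {a : Type} (l : List a) (f g : a → Bool)
    (H : ∀ x ∈ l, f x = g x) : l.any f = l.any g := by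
  induction l with
  | nil => rfl
  | cons x xs ih =>
      simp only [List.any_cons, H x (by simp), ih fun y hy => H y (by simp [hy])]

theorem has_wrong_break_spec : Claim_equal_has_wrong_break := by
  intro real_seg pred_seg _ hpre
  unfold Spec_has_wrong_break has_wrong_break has_wrong_break_alt
  refine pv_any_congr _ _ _ fun r hrmem => ?_
  obtain ⟨h, t, rfl⟩ := List.exists_cons_of_ne_nil (hpre r hrmem)
  have hget : PySem.List.pyGet? (h :: t) (0 : Int) = some h := by
    simp [PySem.List.pyGet?, PySem.List.pyIdx?]
  simp only [hget, pv_getD_idx, PySem.Dict.getD_empty, List.nil_append,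
    List.any_flatMap, pv_any_replicate]
  refine pv_any_congr _ _ _ fun p _ => ?_
  by_cases hm : h ∈ p
  · have hc : (PySem.List.dedup p).count h ≠ 0 := by
      simpa [Nat.pos_iff_ne_zero] using List.count_pos_iff.mpr ((PySem.List.mem_dedup p h).mpr hm)
    simp only [hc, hm, decide_true, Bool.true_and, ne_eq, not_false_eq_true]
    rcases Bool.eq_false_or_eq_true (PySem.Set.issuperset (PySem.Set.ofList p) (PySem.Set.ofList (h :: t))) with hs | hs
    · -- the predicted symbol contains all strokes of the real symbol
      rw [hs, Bool.not_true, List.any_eq_false]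
      intro x hx
      have := (PySem.Set.issuperset_iff (PySem.Set.ofList p) (PySem.Set.ofList (h :: t))).mp hs x
        ((PySem.Set.mem_ofList (h :: t) x).mpr hx)
      simpa [PySem.Set.mem_ofList] using this
    · -- some stroke of the real symbol is missing from the predicted symbol
      rw [hs, Bool.not_false, List.any_eq_true]
      have hne : ¬ (∀ x ∈ (h :: t), x ∈ PySem.Set.ofList p) := by
        intro hall
        have := (PySem.Set.issuperset_iff (PySem.Set.ofList p) (PySem.Set.ofList (h :: t))).mpr
          (fun x hx => hall x ((PySem.Set.mem_ofList (h :: t) x).mp hx))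
        rw [hs] at this
        exact Bool.false_ne_true this
      push Not at hne
      obtain ⟨x, hx1, hx2⟩ := hne
      exact ⟨x, hx1, by simpa [PySem.Set.mem_ofList] using hx2⟩
  · have hz : (PySem.List.dedup p).count h = 0 :=
      List.count_eq_zero.mpr (fun hmem => hm ((PySem.List.mem_dedup p h).mp hmem))
    rw [PySem.List.dedup_eq_ofList] at hz
    simp [hz, hm]

-- ===== VERDICT =====
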